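-- pv_equiv track=rewrite | github.com/eidetic-av/pointcaster | scripts/generate-qt-adapters.py | format_struct_name
-- ===== SOURCE A (Python) =====
-- def format_struct_name(name: str) -> str:
--     name = name.replace("Configuration", "")
--     name = name.replace("Operator", "")
--     result: list[str] = []
--     for i, char in enumerate(name):
--         if i > 0 and char.isupper() and name[i - 1].islower():
--             result.append(" ")
--         result.append(char)
--     return "".join(result)
-- ===== SOURCE B (Python) =====
-- def format_struct_name(name: str) -> str:
--     cleaned = name.replace("Configuration", "").replace("Operator", "")
--     words: list[str] = []
--     current = ""
--     for ch in cleaned: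
--         if ch.isupper() and current and current[-1].islower():
--             words.append(current)
--             current = ch
--         else:
--             current += ch
--     if current:
--         words.append(current)
--     return " ".join(words)
-- ===== Notes on version B (the rewrite author's own statement) =====
-- stated objective: alternative
-- what changed: Instead of an indexed enumerate loop that looks back at name[i-1] and emits characters one by one, B groups the cleaned name into words (starting a new word at each lower-to-upper boundary, tracking only the current word) and joins the words with spaces.
import Mathlib
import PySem

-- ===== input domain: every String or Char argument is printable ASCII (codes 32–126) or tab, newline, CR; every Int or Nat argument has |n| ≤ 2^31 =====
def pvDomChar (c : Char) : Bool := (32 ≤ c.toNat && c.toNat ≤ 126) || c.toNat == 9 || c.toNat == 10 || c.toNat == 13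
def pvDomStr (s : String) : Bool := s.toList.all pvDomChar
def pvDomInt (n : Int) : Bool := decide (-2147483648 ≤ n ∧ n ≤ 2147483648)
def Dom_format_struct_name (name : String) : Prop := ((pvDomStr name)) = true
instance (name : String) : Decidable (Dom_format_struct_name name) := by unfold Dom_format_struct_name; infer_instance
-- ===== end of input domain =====

-- A and B differ only in decomposition: A scans with an index and a look-back at name[i-1];
-- B groups the name into words and joins them with spaces (objective: alternative, same cost).

-- ===== PORT A =====
-- one enumerate step: 'if i > 0 and char.isupper() and name[i-1].islower(): result.append(" "); result.append(char)'
-- (pyGetD is only consulted under the i > 0 guard, where the index i-1 is always in range, as in Python)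
def fsnStepA (full : List Char) (acc : List Char) (ic : Int × Char) : List Char :=
  (if decide (ic.1 > 0) && PySem.Chars.isupper ic.2 && PySem.Chars.islower (PySem.List.pyGetD full (ic.1 - 1) ' ')
   then acc ++ [' '] else acc) ++ [ic.2]

def format_struct_name (name : String) : String :=
  let name1 := PySem.Str.replace name "Configuration" ""
  let name2 := PySem.Str.replace name1 "Operator" ""
  String.ofList ((PySem.List.enumerate name2.toList 0).foldl (fsnStepA name2.toList) [])

-- ===== PORT B =====
-- one loop step of Source B: start a new word when ch is upper and the current word ends in a lower char
def fsnStepB (st : List (List Char) × List Char) (ch : Char) : List (List Char) × List Char :=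
  if PySem.Chars.isupper ch &&
       (match st.2.getLast? with | some p => PySem.Chars.islower p | none => false)
  then (st.1 ++ [st.2], [ch])
  else (st.1, st.2 ++ [ch])

def format_struct_name_alt (name : String) : String :=
  let cleaned := PySem.Str.replace (PySem.Str.replace name "Configuration" "") "Operator" ""
  let st := cleaned.toList.foldl fsnStepB ([], [])
  String.ofList (PySem.Chars.join [' '] (if st.2.isEmpty then st.1 else st.1 ++ [st.2]))

-- ===== PRECONDITION & SPEC =====
def Spec_format_struct_name (name : String) (out : String) : Prop := out = format_struct_name_alt name
instance (name : String) (out : String) : Decidable (Spec_format_struct_name name out) := by unfold Spec_format_struct_name; infer_instance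

-- ===== CLAIM (what is proved, stated in full; the proofs are below) =====
def Claim_equal_format_struct_name : Prop := ∀ (name : String), Dom_format_struct_name name → Spec_format_struct_name name (format_struct_name name)

-- ===== LEMMAS AND PROOFS =====

-- B's finalisation, as a function of the loop state
def fsnFin (ws : List (List Char)) (cur : List Char) : List Char :=
  PySem.Chars.join [' '] (if cur.isEmpty then ws else ws ++ [cur])

theorem fsn_join_snoc_ext (sep : List Char) :
    ∀ (ws : List (List Char)) (w t : List Char),
    PySem.Chars.join sep (ws ++ [w ++ t]) = PySem.Chars.join sep (ws ++ [w]) ++ t := by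
  intro ws
  induction ws with
  | nil => intro w t; simp [PySem.Chars.join_singleton]
  | cons x rest ih =>
    intro w t
    cases rest with
    | nil => simp [PySem.Chars.join_cons_cons, PySem.Chars.join_singleton]
    | cons y ys =>
      simp only [List.cons_append, PySem.Chars.join_cons_cons]
      have := ih w t
      simp only [List.cons_append] at this
      simp [this, List.append_assoc]
theorem fsn_join_append_singleton (sep : List Char) :
    ∀ (ws : List (List Char)) (w : List Char), ws ≠ [] →
    PySem.Chars.join sep (ws ++ [w]) = PySem.Chars.join sep ws ++ sep ++ w := by
  intro ws
  induction ws with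
  | nil => intro w h; exact absurd rfl h
  | cons x rest ih =>
    intro w _
    cases rest with
    | nil => simp [PySem.Chars.join_cons_cons, PySem.Chars.join_singleton]
    | cons y ys =>
      simp only [List.cons_append, PySem.Chars.join_cons_cons]
      have := ih w (by simp)
      simp only [List.cons_append] at this
      simp [this, List.append_assoc]
theorem fsn_core (full : List Char) :
    ∀ (suf : List Char) (k : Nat) (ws : List (List Char)) (cur : List Char),
    full.drop k = suf →
    (cur = [] → k = 0 ∧ ws = []) →
    (∀ p, cur.getLast? = some p → 0 < k ∧ full[k-1]? = some p) →
    (PySem.List.enumerate suf (k : Int)).foldl (fsnStepA full) (fsnFin ws cur) =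
      (fun st => fsnFin st.1 st.2) ((suf.foldl fsnStepB (ws, cur))) := by
  intro suf
  induction suf with
  | nil => intro k ws cur _ _ _; simp [PySem.List.enumerate_nil]
  | cons c rest ih =>
    intro k ws cur hdrop hnil hlastinv
    have hck : full[k]? = some c := by
      have h0 : (full.drop k)[0]? = some c := by rw [hdrop]; rfl
      simpa using h0
    have hdrop' : full.drop (k + 1) = rest := by
      have := congrArg (List.drop 1) hdrop
      simpa [List.drop_drop, Nat.add_comm] using this
    rw [PySem.List.enumerate_cons, List.foldl_cons, List.foldl_cons]
    rcases hlast : cur.getLast? with _ | p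
    · -- cur = [], k = 0, ws = []
      have hcur : cur = [] := List.getLast?_eq_none_iff.mp hlast
      obtain ⟨hk0, hws⟩ := hnil hcur
      subst hk0; subst hws; subst hcur
      have hstepA : fsnStepA full (fsnFin [] []) ((0 : Int), c) = fsnFin [] [c] := by
        simp [fsnStepA, fsnFin, PySem.Chars.join_singleton, PySem.Chars.join_nil]
      have hstepB : fsnStepB ([], []) c = ([], [c]) := by
        simp [fsnStepB]
      simpa [hstepA, hstepB] using
        ih 1 [] [c] (by simpa using hdrop') (by simp) (by simpa using hck)
    · obtain ⟨hkpos, hkp⟩ := hlastinv p hlast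
      have hcurne : cur ≠ [] := by
        intro h; subst h; simp at hlast
      have hgd : PySem.List.pyGetD full ((k : Int) - 1) ' ' = p := by
        have hcast : ((k : Int) - 1) = ((k - 1 : Nat) : Int) := by omega
        rw [hcast, PySem.List.pyGetD_natCast]
        simp [List.getD_eq_getElem?_getD, hkp]
      have hcondA : (decide ((k : Int) > 0) && PySem.Chars.isupper c &&
          PySem.Chars.islower (PySem.List.pyGetD full ((k : Int) - 1) ' '))
          = (PySem.Chars.isupper c && PySem.Chars.islower p) := by
        rw [hgd]
        have : decide ((k : Int) > 0) = true := by simp; omega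
        rw [this, Bool.true_and]
      have hcondB : fsnStepB (ws, cur) c =
          if PySem.Chars.isupper c && PySem.Chars.islower p
          then (ws ++ [cur], [c]) else (ws, cur ++ [c]) := by
        simp [fsnStepB, hlast]
      by_cases hc : (PySem.Chars.isupper c && PySem.Chars.islower p) = true
      · have hstepA : fsnStepA full (fsnFin ws cur) ((k : Int), c) =
            fsnFin (ws ++ [cur]) [c] := by
          simp only [fsnStepA, hcondA, hc, if_true, fsnFin, List.isEmpty_iff,
            hcurne, if_false, List.cons_ne_nil]
          rw [List.append_assoc ws [cur] [[c]],
            ← List.append_assoc ws [cur] [[c]]]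
          rw [fsn_join_append_singleton [' '] (ws ++ [cur]) [c] (by simp)]
        rw [hstepA, hcondB, if_pos hc]
        simpa using ih (k + 1) (ws ++ [cur]) [c] hdrop' (by simp) (by simpa using hck)
      · have hstepA : fsnStepA full (fsnFin ws cur) ((k : Int), c) =
            fsnFin ws (cur ++ [c]) := by
          simp only [fsnStepA, hcondA, hc, if_false, fsnFin, List.isEmpty_iff,
            hcurne, List.append_eq_nil_iff, List.cons_ne_nil, and_false]
          exact (fsn_join_snoc_ext [' '] ws cur [c]).symm
        rw [hstepA, hcondB, if_neg hc]
        have hinv : ∀ q, (cur ++ [c]).getLast? = some q → 0 < k + 1 ∧ full[k + 1 - 1]? = some q := by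
          intro q hq
          simp at hq
          subst hq
          simpa using hck
        simpa using ih (k + 1) ws (cur ++ [c]) hdrop' (by simp) hinv

theorem format_struct_name_spec' (name : String) :
    format_struct_name name = format_struct_name_alt name := by
  have h := fsn_core ((PySem.Str.replace (PySem.Str.replace name "Configuration" "") "Operator" "").toList)
      ((PySem.Str.replace (PySem.Str.replace name "Configuration" "") "Operator" "").toList)
      0 [] [] (by simp) (by simp) (by simp)
  have h0 : fsnFin [] [] = ([] : List Char) := by
    simp [fsnFin, PySem.Chars.join_nil]
  rw [h0] at h
  simp only [Nat.cast_zero, fsnFin] at h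
  simp only [format_struct_name, format_struct_name_alt]
  exact congrArg String.ofList h

-- ===== VERDICT (by name: the statement is the Claim_ definition above) =====
theorem format_struct_name_spec : Claim_equal_format_struct_name := by
  intro name _
  exact format_struct_name_spec' name
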